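-- pv_equiv track=rewrite | github.com/josvisser66/various | ds9/ds9.py | frequency_representation
-- ===== SOURCE A (Python) =====
-- vowels = ["a", "e", "i", "o", "u"]
--
-- def frequency_representation(word):
--     # Map of letter to frequency.
--     freq = {}
--
--     for letter in word:
--         if letter in vowels:
--             continue
--         freq.setdefault(letter, 0)
--         freq[letter] += 1
--
--     result = ""
--
--     for letter in sorted(freq.keys()):
--         result += f"{letter}{freq[letter]}"
--
--     return result
-- ===== SOURCE B (Python) =====
-- vowels = ["a", "e", "i", "o", "u"]
--
-- def frequency_representation(word):
--     # Sort the non-vowel characters, then run-length encode consecutive runs.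
--     cs = sorted(c for c in word if c not in vowels)
--     parts = []
--     i = 0
--     n = len(cs)
--     while i < n:
--         j = i + 1
--         while j < n and cs[j] == cs[i]:
--             j += 1
--         parts.append(cs[i] + str(j - i))
--         i = j
--     return "".join(parts)
-- ===== Notes on version B (the rewrite author's own statement) =====
-- stated objective: alternative
-- what changed: Instead of building a frequency dict and then iterating its sorted keys, B sorts the filtered (non-vowel) characters once and run-length encodes consecutive equal runs in a single scan.
import Mathlib
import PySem

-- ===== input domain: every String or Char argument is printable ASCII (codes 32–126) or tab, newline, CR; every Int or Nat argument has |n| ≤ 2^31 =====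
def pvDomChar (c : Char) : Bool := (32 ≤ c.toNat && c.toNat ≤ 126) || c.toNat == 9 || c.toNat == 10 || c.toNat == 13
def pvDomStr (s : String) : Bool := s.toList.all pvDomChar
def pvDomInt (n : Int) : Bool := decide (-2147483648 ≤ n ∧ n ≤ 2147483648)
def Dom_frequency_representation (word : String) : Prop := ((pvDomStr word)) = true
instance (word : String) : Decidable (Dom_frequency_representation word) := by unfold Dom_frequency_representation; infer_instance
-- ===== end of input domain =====

-- B replaces A's frequency-dict-then-sorted-keys scheme by sort-the-characters-then-run-length-encode (same cost class; a different algorithm).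

-- module-level constant shared by both Python files
def pyVowels : List String := ["a", "e", "i", "o", "u"]

-- ===== PORT A =====
-- freq.setdefault(letter, 0); freq[letter] += 1  (freq[letter] read via getD: the key is present after setdefault)
def frequency_representation (word : String) : String :=
  let freq : PySem.Dict Char Int :=
    word.toList.foldl
      (fun d c =>
        if String.ofList [c] ∈ pyVowels then d
        else
          let d1 := d.setdefault c 0
          d1.insert c (d1.getD c 0 + 1))
      PySem.Dict.empty
  (PySem.List.sorted freq.keys (fun x => x) false).foldl
    (fun r c => r ++ String.ofList [c] ++ PySem.Int.toStr (freq.getD c 0)) ""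

-- ===== PORT B =====
-- the inner 'while j < n and cs[j] == cs[i]' run scan, as structural recursion over the sorted list
def pvRleParts : List Char → List String
  | [] => []
  | c :: rest =>
      (String.ofList [c] ++ PySem.Int.toStr ((1 : Int) + (rest.takeWhile (· == c)).length))
        :: pvRleParts (rest.dropWhile (· == c))
termination_by l => l.length
decreasing_by
  simpa using Nat.lt_succ_of_le (List.length_dropWhile_le _ _)

def frequency_representation_alt (word : String) : String :=
  let cs := PySem.List.sorted (word.toList.filter (fun c => !(String.ofList [c] ∈ pyVowels))) (fun x => x) false
  PySem.Str.join "" (pvRleParts cs)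

-- ===== PRECONDITION & SPEC =====
def Spec_frequency_representation (word : String) (out : String) : Prop := out = frequency_representation_alt word
instance (word : String) (out : String) : Decidable (Spec_frequency_representation word out) := by unfold Spec_frequency_representation; infer_instance

-- ===== CLAIM (what is proved, stated in full; the proofs are below) =====
def Claim_equal_frequency_representation : Prop := ∀ (word : String), Dom_frequency_representation word → Spec_frequency_representation word (frequency_representation word)

-- ===== LEMMAS AND PROOFS =====

-- A's per-letter update (setdefault 0 then += 1) is the insert-getD-add-one step
theorem pv_insert_setdefault (d : PySem.Dict Char Int) (c : Char) (v : Int) :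
    (d.setdefault c 0).insert c v = d.insert c v := by
  by_cases h : d.contains c = true
  · simp [PySem.Dict.setdefault, h]
  · have h' : (d.items.any fun p => p.1 == c) = false := eq_false_of_ne_true h
    have hmap : d.items.map (fun p => if p.1 = c then (c, v) else p) = d.items := by
      have hall : ∀ p ∈ d.items, (if p.1 = c then (c, v) else p) = id p := by
        intro p hp
        have : ¬ p.1 = c := by
          simpa using List.any_eq_false.mp h' p hp
        simp [this]
      rw [List.map_congr_left hall, List.map_id]
    apply PySem.Dict.ext
    simp only [PySem.Dict.setdefault, PySem.Dict.contains, h', Bool.false_eq_true, if_false,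
      PySem.Dict.insert, List.any_append, List.map_append, Bool.false_or]
    simp [hmap]

theorem pv_step_eq (d : PySem.Dict Char Int) (c : Char) :
    (d.setdefault c 0).insert c ((d.setdefault c 0).getD c 0 + 1) = d.insert c (d.getD c 0 + 1) := by
  rw [PySem.Dict.getD_setdefault_self, pv_insert_setdefault]

-- a loop that skips elements satisfying p is the loop over the filtered list
theorem pv_foldl_skip {α β : Type} (p : α → Prop) [DecidablePred p] (f : β → α → β)
    (l : List α) (init : β) :
    l.foldl (fun d c => if p c then d else f d c) init
      = (l.filter (fun c => !(decide (p c)))).foldl f init := by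
  induction l generalizing init with
  | nil => rfl
  | cons x xs ih =>
      by_cases hx : p x
      · simp [hx, ih]
      · simp [hx, ih]

theorem pv_join_empty_cons (s : String) (parts : List String) :
    PySem.Str.join "" (s :: parts) = s ++ PySem.Str.join "" parts := by
  cases parts with
  | nil => simp [PySem.Str.join, PySem.Chars.join_singleton, PySem.Chars.join_nil,
      String.ofList_toList]
  | cons t rest =>
      show String.ofList (PySem.Chars.join "".toList (s.toList :: t.toList :: rest.map String.toList)) = _
      rw [PySem.Chars.join_cons_cons]
      simp [String.ofList_append, String.ofList_toList, PySem.Str.join]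

theorem pv_foldl_append_eq_join (f : Char → String) (l : List Char) (a : String) :
    l.foldl (fun r c => r ++ f c) a = a ++ PySem.Str.join "" (l.map f) := by
  induction l generalizing a with
  | nil => simp [PySem.Str.join, PySem.Chars.join_nil]
  | cons x xs ih =>
      simp only [List.foldl_cons, List.map_cons, ih, pv_join_empty_cons, String.append_assoc]

theorem pv_foldl_add_skip (t : List Char) (a : PySem.Set Char) (c : Char)
    (ht : ∀ y ∈ t, y = c) (hc : c ∈ a) : t.foldl PySem.Set.add a = a := by
  induction t with
  | nil => rfl
  | cons y ys ih =>
      have hy : y = c := ht y (by simp)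
      have hadd : PySem.Set.add a y = a := by
        rw [hy]; simp [PySem.Set.add, PySem.Set.contains, hc]
      rw [List.foldl_cons, hadd]
      exact ih (fun z hz => ht z (by simp [hz]))

theorem pv_foldl_add_cons (l : List Char) (a : List Char) (c : Char) (hc : c ∉ l) :
    l.foldl PySem.Set.add (c :: a) = c :: l.foldl PySem.Set.add a := by
  induction l generalizing a with
  | nil => rfl
  | cons y ys ih =>
      have hyne : ¬ y = c := fun h => hc (by simp [h.symm])
      have hstep : PySem.Set.add (c :: a) y = c :: PySem.Set.add a y := by
        by_cases hmem : y ∈ a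
        · simp [PySem.Set.add, PySem.Set.contains, hmem]
        · simp [PySem.Set.add, PySem.Set.contains, hyne, hmem]
      rw [List.foldl_cons, hstep, List.foldl_cons]
      exact ih _ (fun h => hc (by simp [h]))

-- set(xs) (first occurrences) is a sublist of xs
theorem pv_ofList_sublist_aux (l : List Char) :
    ∀ a : List Char, ∃ t, l.foldl PySem.Set.add a = a ++ t ∧ t.Sublist l := by
  induction l with
  | nil => exact fun a => ⟨[], by simp⟩
  | cons x xs ih =>
      intro a
      by_cases h : x ∈ a
      · obtain ⟨t, ht, hs⟩ := ih a
        exact ⟨t, by simpa [PySem.Set.add, PySem.Set.contains, h] using ht, hs.cons x⟩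
      · obtain ⟨t, ht, hs⟩ := ih (a ++ [x])
        exact ⟨x :: t, by simpa [PySem.Set.add, PySem.Set.contains, h] using ht, hs.cons₂ x⟩

theorem pv_ofList_sublist (l : List Char) : (PySem.Set.ofList l).Sublist l := by
  obtain ⟨t, ht, hs⟩ := pv_ofList_sublist_aux l []
  simpa [PySem.Set.ofList, ht] using hs

theorem pv_pairwise_lt_ofList (l : List Char) (h : l.Pairwise (· ≤ ·)) :
    (PySem.Set.ofList l).Pairwise (· < ·) := by
  have h1 : (PySem.Set.ofList l).Pairwise (· ≤ ·) := List.Pairwise.sublist (pv_ofList_sublist l) h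
  have h2 : (PySem.Set.ofList l).Pairwise (· ≠ ·) := PySem.Set.nodup_ofList l
  exact (h1.and h2).imp (fun ⟨hle, hne⟩ => lt_of_le_of_ne hle hne)

theorem pv_not_mem_dropWhile (l : List Char) (c : Char)
    (hp : l.Pairwise (· ≤ ·)) (hge : ∀ y ∈ l, c ≤ y) :
    c ∉ l.dropWhile (· == c) := by
  induction l with
  | nil => simp
  | cons y ys ih =>
      by_cases hy : (y == c) = true
      · rw [List.dropWhile_cons, if_pos hy]
        exact ih hp.tail (fun z hz => hge z (by simp [hz]))
      · rw [List.dropWhile_cons, if_neg hy]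
        have hyc : y ≠ c := fun h => hy (by simp [h])
        have hcy : c < y := lt_of_le_of_ne (hge y (by simp)) (Ne.symm hyc)
        intro hmem
        rcases List.mem_cons.mp hmem with h | h
        · exact hyc h.symm
        · have hyz : y ≤ c := (List.pairwise_cons.mp hp).1 c h
          exact absurd (lt_of_lt_of_le hcy hyz) (lt_irrefl c)

-- the heart: run-length encoding of a ≤-sorted list equals letter+count over its distinct elements
theorem pv_ofList_cons_runs (c : Char) (rest t d : List Char)
    (htd : t ++ d = rest) (htc : ∀ y ∈ t, y = c) (hcd : c ∉ d) :
    PySem.Set.ofList (c :: rest) = c :: PySem.Set.ofList d := by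
  show List.foldl PySem.Set.add PySem.Set.empty (c :: rest) = _
  rw [List.foldl_cons]
  have h1 : PySem.Set.add PySem.Set.empty c = [c] := by
    simp [PySem.Set.add, PySem.Set.empty, PySem.Set.contains]
  rw [h1, ← htd, List.foldl_append, pv_foldl_add_skip t [c] c htc (by simp),
    pv_foldl_add_cons d [] c hcd]
  rfl

theorem pv_rle_spec (n : Nat) : ∀ ys : List Char, ys.length ≤ n → ys.Pairwise (· ≤ ·) →
    PySem.Str.join "" (pvRleParts ys)
      = PySem.Str.join "" ((PySem.Set.ofList ys).map
          (fun x => String.ofList [x] ++ PySem.Int.toStr ((ys.count x : Int)))) := by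
  induction n with
  | zero =>
      intro ys h _
      have : ys = [] := List.eq_nil_of_length_eq_zero (Nat.le_zero.mp h)
      subst this
      simp [pvRleParts, PySem.Set.ofList, PySem.Set.empty]
  | succ n ih =>
      intro ys hlen hp
      cases ys with
      | nil => simp [pvRleParts, PySem.Set.ofList, PySem.Set.empty]
      | cons c rest =>
          have htd : rest.takeWhile (· == c) ++ rest.dropWhile (· == c) = rest :=
            List.takeWhile_append_dropWhile
          have htc : ∀ y ∈ rest.takeWhile (· == c), y = c := by
            intro y hy
            simpa using List.mem_takeWhile_imp hy
          have hge : ∀ y ∈ rest, c ≤ y := (List.pairwise_cons.mp hp).1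
          have hpr : rest.Pairwise (· ≤ ·) := (List.pairwise_cons.mp hp).2
          have hcd : c ∉ rest.dropWhile (· == c) := pv_not_mem_dropWhile rest c hpr hge
          have hpd : (rest.dropWhile (· == c)).Pairwise (· ≤ ·) :=
            List.Pairwise.sublist (List.dropWhile_sublist _) hpr
          have hlend : (rest.dropWhile (· == c)).length ≤ n := by
            have h1 := List.Sublist.length_le (List.dropWhile_sublist (l := rest) (· == c))
            have h2 : rest.length + 1 ≤ n + 1 := by simpa using hlen
            omega
          have IH := ih (rest.dropWhile (· == c)) hlend hpd
          -- counts
          have hcnt_t : (rest.takeWhile (· == c)).count c = (rest.takeWhile (· == c)).length :=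
            List.count_eq_length.mpr (fun b hb => (htc b hb).symm)
          have hcnt_d : (rest.dropWhile (· == c)).count c = 0 := List.count_eq_zero.mpr hcd
          have hcnt_c : (c :: rest).count c = (rest.takeWhile (· == c)).length + 1 := by
            rw [List.count_cons_self]
            conv_lhs => rw [← htd]
            rw [List.count_append, hcnt_t, hcnt_d]
          have hcnt_x : ∀ x ∈ PySem.Set.ofList (rest.dropWhile (· == c)),
              (c :: rest).count x = (rest.dropWhile (· == c)).count x := by
            intro x hx
            have hxd : x ∈ rest.dropWhile (· == c) := (PySem.Set.mem_ofList _ _).mp hx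
            have hxc : x ≠ c := fun h => hcd (h ▸ hxd)
            have hxt : x ∉ rest.takeWhile (· == c) := fun h => hxc (htc x h)
            rw [List.count_cons_of_ne (Ne.symm hxc)]
            conv_lhs => rw [← htd]
            rw [List.count_append, List.count_eq_zero.mpr hxt, Nat.zero_add]
          -- unfold one step of the run-length encoder
          have hparts : pvRleParts (c :: rest)
              = (String.ofList [c] ++ PySem.Int.toStr ((1 : Int) + (rest.takeWhile (· == c)).length))
                :: pvRleParts (rest.dropWhile (· == c)) := by
            simp only [pvRleParts]
          rw [hparts, pv_join_empty_cons,
            pv_ofList_cons_runs c rest _ _ htd htc hcd, List.map_cons, pv_join_empty_cons]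
          have hmapc : String.ofList [c] ++ PySem.Int.toStr (((c :: rest).count c : Int))
              = String.ofList [c] ++ PySem.Int.toStr ((1 : Int) + (rest.takeWhile (· == c)).length) := by
            rw [hcnt_c]
            congr 1
            congr 1
            push_cast
            ring
          rw [hmapc]
          congr 1
          rw [IH]
          congr 1
          apply List.map_congr_left
          intro x hx
          rw [hcnt_x x hx]

theorem frequency_representation_spec_aux (word : String) :
    frequency_representation word = frequency_representation_alt word := by
  unfold frequency_representation frequency_representation_alt
  have hbody : (fun (d : PySem.Dict Char Int) (c : Char) =>
        if String.ofList [c] ∈ pyVowels then d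
        else
          let d1 := d.setdefault c 0
          d1.insert c (d1.getD c 0 + 1))
      = (fun (d : PySem.Dict Char Int) (c : Char) =>
        if String.ofList [c] ∈ pyVowels then d else d.insert c (d.getD c 0 + 1)) := by
    funext d c
    by_cases h : String.ofList [c] ∈ pyVowels
    · simp [h]
    · simp only [h, if_false]
      exact pv_step_eq d c
  rw [hbody, pv_foldl_skip (fun c => String.ofList [c] ∈ pyVowels),
    PySem.Dict.foldl_insert_getD_add_one_eq_counter]
  simp only [PySem.Dict.keys_counter, PySem.Dict.getD_counter]
  set xs := word.toList.filter (fun c => !(decide (String.ofList [c] ∈ pyVowels))) with hxs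
  set ys := PySem.List.sorted xs (fun x => x) false with hys
  have hsort : PySem.List.sorted (PySem.Set.ofList xs) (fun x => x) false
      = PySem.Set.ofList ys := by
    apply PySem.List.sorted_eq_of_perm_of_pairwise_lt
    · refine (List.perm_ext_iff_of_nodup (PySem.Set.nodup_ofList _) (PySem.Set.nodup_ofList _)).mpr ?_
      intro a
      rw [PySem.Set.mem_ofList, PySem.Set.mem_ofList, hys, PySem.List.mem_sorted]
    · exact pv_pairwise_lt_ofList _ (by
        simpa using PySem.List.sorted_pairwise xs (fun x => x))
  rw [hsort]
  have hassoc : (fun (r : String) (c : Char) => r ++ String.ofList [c]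
        ++ PySem.Int.toStr ((List.count c xs : Int)))
      = (fun (r : String) (c : Char) => r ++ (String.ofList [c]
        ++ PySem.Int.toStr ((List.count c xs : Int)))) := by
    funext r c
    rw [String.append_assoc]
  rw [hassoc, pv_foldl_append_eq_join, String.empty_append,
    pv_rle_spec ys.length ys le_rfl (by simpa using PySem.List.sorted_pairwise xs (fun x => x))]
  congr 1
  apply List.map_congr_left
  intro x hx
  have hc := (PySem.List.sorted_perm xs (fun x => x) false).count_eq x
  rw [← hys] at hc
  rw [hc]

-- ===== VERDICT (by name: the statement is the Claim_ definition above) =====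
theorem frequency_representation_spec : Claim_equal_frequency_representation := by
  intro word _
  exact frequency_representation_spec_aux word
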